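-- pv_equiv track=rewrite | github.com/kote-e/codigos.py | trabajos/Tarea_UVAs.py | impar
-- ===== SOURCE A (Python) =====
-- def impar(texto):
--     i = 0
--     texto_mensaje=""
--     while i < len(texto):
--         j = i
--         palabra = ""
--         while j < len(texto) and texto[j] != " ":
--             palabra += texto[j]
--             j += 1
--         if (len(palabra) % 2 == 1) and len(palabra) > 0:
--             texto_mensaje += palabra[0]
--         i = j + 1
--
--     return texto_mensaje
-- ===== SOURCE B (Python) =====
-- def impar(texto):
--     return "".join(w[0] for w in texto.split(" ") if len(w) % 2 == 1)
-- ===== Notes on version B (the rewrite author's own statement) =====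
-- stated objective: idiomatic
-- what changed: Replaced the manual index-based nested-while tokenizer (which grows each word by repeated string concatenation) with a single-space str.split to build the word list, then one comprehension taking first letters of odd-length words (the len>0 guard disappears, being implied by oddness).
import Mathlib
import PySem

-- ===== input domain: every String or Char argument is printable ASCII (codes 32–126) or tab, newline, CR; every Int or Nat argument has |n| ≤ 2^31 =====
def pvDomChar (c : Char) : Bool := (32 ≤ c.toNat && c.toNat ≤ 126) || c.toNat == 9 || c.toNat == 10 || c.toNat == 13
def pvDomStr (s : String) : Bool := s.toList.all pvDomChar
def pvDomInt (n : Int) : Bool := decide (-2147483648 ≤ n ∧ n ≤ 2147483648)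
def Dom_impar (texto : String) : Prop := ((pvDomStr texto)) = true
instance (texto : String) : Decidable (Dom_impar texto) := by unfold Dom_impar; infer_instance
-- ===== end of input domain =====

-- B replaces A's manual index-based nested-while tokenizer with split(" ") plus one
-- comprehension over the resulting words (objective: idiomatic; a timing run measured B faster); return values agree on all inputs.

-- ===== PORT A =====
-- inner while: consumes chars until a space or the end; palabra is the accumulator
-- (palabra += texto[j]); returns (palabra, remaining suffix starting at position j).
def imparInner (palabra : List Char) : List Char → List Char × List Char
  | [] => (palabra, [])
  | c :: rest => if c = ' ' then (palabra, c :: rest) else imparInner (palabra ++ [c]) rest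

-- the remaining suffix never grows (for termination of the outer loop)
theorem imparInner_snd_le (l : List Char) : ∀ p, (imparInner p l).2.length ≤ l.length := by
  induction l with
  | nil => intro p; simp [imparInner]
  | cons c rest ih =>
    intro p
    simp only [imparInner]
    split
    · simp
    · exact (ih (p ++ [c])).trans (by simp)

-- outer while over the suffix starting at i; i = j + 1 is the drop of one char after the word
def imparLoop : List Char → List Char → List Char
  | [], acc => acc
  | c :: rest, acc =>
    let pr := imparInner [] (c :: rest)
    let acc' := if pr.1.length % 2 = 1 ∧ pr.1.length > 0 then acc ++ pr.1.take 1 else acc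
    imparLoop (pr.2.drop 1) acc'
termination_by l _ => l.length
decreasing_by
  have h := imparInner_snd_le (c :: rest) []
  simp only [List.length_drop, List.length_cons] at *
  omega

def impar (texto : String) : String := String.mk (imparLoop texto.toList [])

-- ===== PORT B =====
-- texto.split(" "), keep odd-length words, take each word's first character (w[0], a
-- one-character string = take 1, exact because the filter keeps only nonempty words), join.
def impar_alt (texto : String) : String :=
  String.mk (PySem.Chars.join []
    (((PySem.Chars.splitOn texto.toList [' ']).filter (fun w => w.length % 2 == 1)).map
      (fun w => w.take 1)))

-- ===== PRECONDITION & SPEC =====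
def Spec_impar (texto : String) (out : String) : Prop := out = impar_alt texto
instance (texto : String) (out : String) : Decidable (Spec_impar texto out) := by unfold Spec_impar; infer_instance

-- ===== CLAIM (what is proved, stated in full; the proofs are below) =====
def Claim_equal_impar : Prop := ∀ (texto : String), Dom_impar texto → Spec_impar texto (impar texto)

-- ===== LEMMAS AND PROOFS =====

-- reference single-space splitter used only inside the proofs
def splitSp : List Char → List (List Char)
  | [] => [[]]
  | c :: rest =>
    if c = ' ' then [] :: splitSp rest
    else match splitSp rest with
      | [] => [[c]]
      | w :: ws => (c :: w) :: ws

def consHead (p : List Char) : List (List Char) → List (List Char)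
  | [] => [p]
  | w :: ws => (p ++ w) :: ws

theorem splitSp_ne_nil (l : List Char) : splitSp l ≠ [] := by
  cases l with
  | nil => simp [splitSp]
  | cons c rest =>
    simp only [splitSp]
    split
    · simp
    · split <;> simp

theorem go_eq (l : List Char) : ∀ cur acc,
    PySem.Chars.splitOn.go [' '] (l.length + 1) l cur acc
      = acc.reverse ++ consHead cur.reverse (splitSp l) := by
  induction l with
  | nil =>
    intro cur acc
    simp [PySem.Chars.splitOn.go, splitSp, consHead]
  | cons c rest ih =>
    intro cur acc
    show PySem.Chars.splitOn.go [' '] (rest.length + 1 + 1) (c :: rest) cur acc = _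
    rw [PySem.Chars.splitOn.go]
    by_cases hc : c = ' '
    · subst hc
      simp only [List.isPrefixOf, beq_self_eq_true, Bool.true_and, if_pos,
        List.length_cons, List.length_nil, List.drop_succ_cons, List.drop_zero]
      rw [ih]
      cases h : splitSp rest with
      | nil => exact absurd h (splitSp_ne_nil rest)
      | cons w ws => simp [splitSp, consHead, h]
    · have hp : ([' '].isPrefixOf (c :: rest)) = false := by
        simp only [List.isPrefixOf, Bool.and_eq_false_iff, beq_eq_false_iff_ne, ne_eq]
        exact Or.inl fun h => hc h.symm
      simp only [hp, Bool.false_eq_true, if_false]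
      rw [ih]
      cases h : splitSp rest with
      | nil => exact absurd h (splitSp_ne_nil rest)
      | cons w ws => simp [splitSp, consHead, h, hc]

theorem splitOn_sp (l : List Char) : PySem.Chars.splitOn l [' '] = splitSp l := by
  have h0 := go_eq l [] []
  cases h : splitSp l with
  | nil => exact absurd h (splitSp_ne_nil l)
  | cons w ws => simpa [PySem.Chars.splitOn, consHead, h] using h0

theorem join_nil_flatten (parts : List (List Char)) :
    PySem.Chars.join [] parts = parts.flatten := by
  induction parts with
  | nil => simp [PySem.Chars.join, List.intercalate]
  | cons p ps ih =>
    cases ps with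
    | nil => simp [PySem.Chars.join, List.intercalate]
    | cons q qs =>
      simp only [PySem.Chars.join, List.intercalate] at *
      simp [List.intersperse, ih]

-- the inner while is takeWhile/dropWhile on (· ≠ ' ')
theorem imparInner_eq (l : List Char) : ∀ p,
    imparInner p l = (p ++ l.takeWhile (· ≠ ' '), l.dropWhile (· ≠ ' ')) := by
  induction l with
  | nil => intro p; simp [imparInner]
  | cons c rest ih =>
    intro p
    by_cases hc : c = ' '
    · subst hc; simp [imparInner, List.takeWhile, List.dropWhile]
    · simp [imparInner, List.takeWhile, List.dropWhile, hc, ih]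

-- one splitting step: the first word is the takeWhile, the rest follows the dropped space
theorem split_step (l : List Char) :
    (l.dropWhile (· ≠ ' ') = [] ∧ splitSp l = [l.takeWhile (· ≠ ' ')]) ∨
    (∃ rest, l.dropWhile (· ≠ ' ') = ' ' :: rest ∧
      splitSp l = l.takeWhile (· ≠ ' ') :: splitSp rest) := by
  induction l with
  | nil => left; simp [splitSp]
  | cons c t ih =>
    by_cases hc : c = ' '
    · subst hc
      right
      exact ⟨t, by simp [List.dropWhile], by simp [splitSp, List.takeWhile]⟩
    · rcases ih with ⟨h1, h2⟩ | ⟨rest, h1, h2⟩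
      · left
        constructor
        · simpa [List.dropWhile, hc] using h1
        · simp [splitSp, List.takeWhile, hc, h2]
      · right
        refine ⟨rest, by simpa [List.dropWhile, hc] using h1, ?_⟩
        simp [splitSp, List.takeWhile, hc, h2]

-- B's core on the list side
def bFlat (cs : List Char) : List Char :=
  (((splitSp cs).filter (fun w => w.length % 2 == 1)).map (fun w => w.take 1)).flatten

theorem loop_eq (cs : List Char) (acc : List Char) :
    imparLoop cs acc = acc ++ bFlat cs := by
  induction cs, acc using imparLoop.induct with
  | case1 acc => simp [imparLoop, bFlat, splitSp]
  | case2 c rest acc pr acc' ih =>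
    rw [imparLoop]
    have hin := imparInner_eq (c :: rest) []
    rcases split_step (c :: rest) with ⟨h1, h2⟩ | ⟨r', h1, h2⟩ <;>
      simp only [pr, acc', hin, List.nil_append, h1, List.drop_nil, List.drop_succ_cons,
        List.drop_zero] at ih ⊢
    · simp only [imparLoop, bFlat, h2, List.filter_cons, List.filter_nil, beq_iff_eq]
      split_ifs with hA hB
      · simp
      · exact absurd hA.1 hB
      · omega
      · simp
    · simp only [dite_eq_ite] at ih
      rw [ih]
      simp only [bFlat, h2, List.filter_cons, beq_iff_eq]
      split_ifs with hA hB
      · simp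
      · exact absurd hA.1 hB
      · omega
      · simp

-- ===== VERDICT (by name: the statement is the Claim_ definition above) =====
theorem impar_spec : Claim_equal_impar := by
  intro texto _
  unfold Spec_impar impar impar_alt
  rw [splitOn_sp, join_nil_flatten, loop_eq]
  simp [bFlat]
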